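-- pv_equiv track=rewrite | github.com/posl/comment_recommendation | script/split_gen/4_time/ja/119_C/9.py | getMinMP
-- ===== SOURCE A (Python) =====
-- def getMinMP(n, a, b, c, l):
--     minMP = 10 ** 9
--     for i in range(4 ** n):
--         tmp = i
--         mp = 0
--         a1, b1, c1 = 0, 0, 0
--         for j in range(n):
--             if tmp % 4 == 1:
--                 a1 += l[j]
--                 mp += 10
--             elif tmp % 4 == 2:
--                 b1 += l[j]
--                 mp += 10
--             elif tmp % 4 == 3:
--                 c1 += l[j]
--                 mp += 10
--             tmp //= 4
--         if a1 > 0 and b1 > 0 and c1 > 0: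
--             mp += abs(a - a1) + abs(b - b1) + abs(c - c1)
--             minMP = min(mp, minMP)
--     return minMP
-- ===== SOURCE B (Python) =====
-- def getMinMP(n, a, b, c, l):
--     def dfs(j, a1, b1, c1, mp):
--         if j == n:
--             if a1 > 0 and b1 > 0 and c1 > 0:
--                 return mp + abs(a - a1) + abs(b - b1) + abs(c - c1)
--             return 10 ** 9
--         x = l[j]
--         return min(dfs(j + 1, a1, b1, c1, mp),
--                    dfs(j + 1, a1 + x, b1, c1, mp + 10),
--                    dfs(j + 1, a1, b1 + x, c1, mp + 10),
--                    dfs(j + 1, a1, b1, c1 + x, mp + 10))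
--     return dfs(0, 0, 0, 0, 0)
-- ===== Notes on version B (the rewrite author's own statement) =====
-- stated objective: alternative
-- what changed: Replaced the base-4 counter enumeration (decode each i in range(4**n) and recompute all sums per code) by a 4-way branching recursion over the sticks that threads the partial sums a1/b1/c1 and mp down the call tree, removing the per-code decode/re-sum inner loop.
import Mathlib
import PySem

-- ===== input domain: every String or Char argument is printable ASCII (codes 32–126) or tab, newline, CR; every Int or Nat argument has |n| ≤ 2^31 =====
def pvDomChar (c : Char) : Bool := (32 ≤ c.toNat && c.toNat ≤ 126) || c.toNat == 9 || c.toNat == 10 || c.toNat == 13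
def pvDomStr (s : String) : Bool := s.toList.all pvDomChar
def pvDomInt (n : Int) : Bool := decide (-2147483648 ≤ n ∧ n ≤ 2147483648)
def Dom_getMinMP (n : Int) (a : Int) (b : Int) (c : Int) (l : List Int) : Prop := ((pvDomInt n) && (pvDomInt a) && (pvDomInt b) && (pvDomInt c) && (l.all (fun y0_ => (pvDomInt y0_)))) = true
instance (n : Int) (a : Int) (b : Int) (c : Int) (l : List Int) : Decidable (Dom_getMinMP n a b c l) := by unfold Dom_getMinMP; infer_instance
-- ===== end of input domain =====

-- B replaces A's base-4 counter enumeration by a 4-way branching recursion over the sticks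
-- that threads the partial sums down the call tree (objective: alternative decomposition).

-- ===== PORT A =====
-- inner loop body of A: state (tmp, mp, a1, b1, c1), index j reads l[j]
def stepA (l : List Int) (st : Int × Int × Int × Int × Int) (j : Int) : Int × Int × Int × Int × Int :=
  if PySem.Int.mod st.1 4 = 1 then
    (PySem.Int.floordiv st.1 4, st.2.1 + 10, st.2.2.1 + PySem.List.pyGetD l j 0, st.2.2.2.1, st.2.2.2.2)
  else if PySem.Int.mod st.1 4 = 2 then
    (PySem.Int.floordiv st.1 4, st.2.1 + 10, st.2.2.1, st.2.2.2.1 + PySem.List.pyGetD l j 0, st.2.2.2.2)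
  else if PySem.Int.mod st.1 4 = 3 then
    (PySem.Int.floordiv st.1 4, st.2.1 + 10, st.2.2.1, st.2.2.2.1, st.2.2.2.2 + PySem.List.pyGetD l j 0)
  else
    (PySem.Int.floordiv st.1 4, st.2.1, st.2.2.1, st.2.2.2.1, st.2.2.2.2)

-- outer loop body of A: decode code i over j ∈ range(n), then fold the candidate into minMP
def outerA (n a b c : Int) (l : List Int) (minMP : Int) (i : Int) : Int :=
  match (PySem.List.pyRange 0 n 1).foldl (stepA l) (i, 0, 0, 0, 0) with
  | (_, mp, a1, b1, c1) =>
    if a1 > 0 ∧ b1 > 0 ∧ c1 > 0 then min (mp + |a - a1| + |b - b1| + |c - c1|) minMP else minMP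

-- 4 ** n is ported as (4:Int) ^ n.toNat: exact for the n ≥ 0 admitted by Pre_getMinMP
def getMinMP (n : Int) (a : Int) (b : Int) (c : Int) (l : List Int) : Int :=
  (PySem.List.pyRange 0 ((4 : Int) ^ n.toNat) 1).foldl (outerA n a b c l) (10 ^ 9)

-- ===== PORT B =====
-- dfs(j, a1, b1, c1, mp): the fuel parameter (n - j when called inside Pre_) only makes the
-- recursion structurally terminating; Python's l[j] is pyGetD (exact where B returns)
def dfsB (n a b c : Int) (l : List Int) : Nat → Int → Int → Int → Int → Int → Int
  | fuel, j, a1, b1, c1, mp =>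
    if j = n then
      if a1 > 0 ∧ b1 > 0 ∧ c1 > 0 then mp + |a - a1| + |b - b1| + |c - c1| else 10 ^ 9
    else
      match fuel with
      | 0 => 0
      | fuel + 1 =>
        min (min (min (dfsB n a b c l fuel (j + 1) a1 b1 c1 mp)
                      (dfsB n a b c l fuel (j + 1) (a1 + PySem.List.pyGetD l j 0) b1 c1 (mp + 10)))
                 (dfsB n a b c l fuel (j + 1) a1 (b1 + PySem.List.pyGetD l j 0) c1 (mp + 10)))
            (dfsB n a b c l fuel (j + 1) a1 b1 (c1 + PySem.List.pyGetD l j 0) (mp + 10))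

def getMinMP_alt (n : Int) (a : Int) (b : Int) (c : Int) (l : List Int) : Int :=
  dfsB n a b c l n.toNat 0 0 0 0 0

-- ===== PRECONDITION & SPEC =====
-- A raises TypeError (range of a float 4**n) for n < 0 and IndexError for n > len(l); Pre_ excludes exactly those.
def Pre_getMinMP (n : Int) (a : Int) (b : Int) (c : Int) (l : List Int) : Prop :=
  0 ≤ n ∧ n ≤ (l.length : Int)
instance (n : Int) (a : Int) (b : Int) (c : Int) (l : List Int) : Decidable (Pre_getMinMP n a b c l) := by unfold Pre_getMinMP; infer_instance

def pvWitness_getMinMP : Int × Int × Int × Int × List Int := (2, 1, 1, 1, [1, 2])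

def Spec_getMinMP (n : Int) (a : Int) (b : Int) (c : Int) (l : List Int) (out : Int) : Prop := out = getMinMP_alt n a b c l
instance (n : Int) (a : Int) (b : Int) (c : Int) (l : List Int) (out : Int) : Decidable (Spec_getMinMP n a b c l out) := by unfold Spec_getMinMP; infer_instance

-- ===== CLAIM (what is proved, stated in full; the proofs are below) =====
def Claim_equal_getMinMP : Prop := ∀ (n : Int) (a : Int) (b : Int) (c : Int) (l : List Int), Dom_getMinMP n a b c l → Pre_getMinMP n a b c l → Spec_getMinMP n a b c l (getMinMP n a b c l)
-- ===== LEMMAS AND PROOFS =====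

-- proof-side vocabulary: state (mp, a1, b1, c1), one base-4 digit applied to one stick
def applyD (d x : Int) (st : Int × Int × Int × Int) : Int × Int × Int × Int :=
  if d = 1 then (st.1 + 10, st.2.1 + x, st.2.2.1, st.2.2.2)
  else if d = 2 then (st.1 + 10, st.2.1, st.2.2.1 + x, st.2.2.2)
  else if d = 3 then (st.1 + 10, st.2.1, st.2.2.1, st.2.2.2 + x)
  else st

def innerA (tmp : Int) : List Int → (Int × Int × Int × Int) → Int × Int × Int × Int
  | [], st => st
  | x :: xs, st => innerA (PySem.Int.floordiv tmp 4) xs (applyD (PySem.Int.mod tmp 4) x st)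

def leafOf (a b c : Int) (st : Int × Int × Int × Int) : Int :=
  if st.2.1 > 0 ∧ st.2.2.1 > 0 ∧ st.2.2.2 > 0 then
    st.1 + |a - st.2.1| + |b - st.2.2.1| + |c - st.2.2.2| else 10 ^ 9

-- list-structured form of B's dfs used by the proofs (dfsB with index/fuel is bridged to it)
def dfsAlt (a b c : Int) : List Int → Int → Int → Int → Int → Int
  | [], a1, b1, c1, mp =>
      if a1 > 0 ∧ b1 > 0 ∧ c1 > 0 then mp + |a - a1| + |b - b1| + |c - c1| else 10 ^ 9
  | x :: rest, a1, b1, c1, mp =>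
      min (min (min (dfsAlt a b c rest a1 b1 c1 mp)
                    (dfsAlt a b c rest (a1 + x) b1 c1 (mp + 10)))
               (dfsAlt a b c rest a1 (b1 + x) c1 (mp + 10)))
          (dfsAlt a b c rest a1 b1 (c1 + x) (mp + 10))

def dfsS (a b c : Int) (xs : List Int) (st : Int × Int × Int × Int) : Int :=
  dfsAlt a b c xs st.2.1 st.2.2.1 st.2.2.2 st.1

lemma stepA_eq (l : List Int) (st : Int × Int × Int × Int × Int) (j : Int) :
    stepA l st j = (PySem.Int.floordiv st.1 4, applyD (PySem.Int.mod st.1 4) (PySem.List.pyGetD l j 0) (st.2.1, st.2.2.1, st.2.2.2.1, st.2.2.2.2)) := by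
  obtain ⟨t, mp, a1, b1, c1⟩ := st
  simp only [stepA, applyD]
  split_ifs <;> rfl

lemma foldl_stepA (l : List Int) : ∀ (k s : Nat), s + k ≤ l.length → ∀ (tmp : Int) (st : Int × Int × Int × Int),
    ∃ t, (PySem.List.pyRange (s : Int) ((s : Int) + (k : Int)) 1).foldl (stepA l) (tmp, st)
      = (t, innerA tmp ((l.drop s).take k) st) := by
  intro k
  induction k with
  | zero =>
      intro s hs tmp st
      refine ⟨tmp, ?_⟩
      rw [show ((s : Int) + ((0 : Nat) : Int)) = (s : Int) by push_cast; ring]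
      rw [PySem.List.pyRange_one_eq_nil le_rfl]
      simp [innerA]
  | succ k ih =>
      intro s hs tmp st
      have hlt : s < l.length := by omega
      have hcons : PySem.List.pyRange (s : Int) ((s : Int) + ((k + 1 : Nat) : Int)) 1
          = (s : Int) :: PySem.List.pyRange ((s : Int) + 1) ((s : Int) + ((k + 1 : Nat) : Int)) 1 :=
        PySem.List.pyRange_one_cons (by push_cast; omega)
      rw [hcons, List.foldl_cons, stepA_eq]
      have hget : PySem.List.pyGetD l (s : Int) 0 = l[s] := by
        simp [PySem.List.pyGetD_natCast, List.getD_eq_getElem?_getD, List.getElem?_eq_getElem hlt]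
      have hdrop : (l.drop s).take (k + 1) = l[s] :: ((l.drop (s + 1)).take k) := by
        rw [List.drop_eq_getElem_cons hlt, List.take_succ_cons]
      rw [hget, hdrop]
      have e1 : (s : Int) + 1 = ((s + 1 : Nat) : Int) := by push_cast; ring
      have e2 : (s : Int) + ((k + 1 : Nat) : Int) = ((s + 1 : Nat) : Int) + ((k : Nat) : Int) := by
        push_cast; ring
      rw [e2, e1]
      have hrec : innerA tmp (l[s] :: ((l.drop (s + 1)).take k)) st
          = innerA (PySem.Int.floordiv tmp 4) ((l.drop (s + 1)).take k)
              (applyD (PySem.Int.mod tmp 4) l[s] st) := rfl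
      rw [hrec]
      exact ih (s + 1) (by omega) (PySem.Int.floordiv tmp 4) (applyD (PySem.Int.mod tmp 4) l[s] st)

lemma dec4 (q r : Int) (h0 : 0 ≤ r) (h1 : r < 4) :
    PySem.Int.mod (4 * q + r) 4 = r ∧ PySem.Int.floordiv (4 * q + r) 4 = q := by
  rw [PySem.Int.mod_eq_emod_of_pos (by omega : (0:Int) < 4),
    PySem.Int.floordiv_eq_ediv_of_pos (by omega : (0:Int) < 4)]
  omega

lemma dfsS_nil (a b c : Int) (st : Int × Int × Int × Int) : dfsS a b c [] st = leafOf a b c st := by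
  obtain ⟨mp, a1, b1, c1⟩ := st; rfl

lemma dfsS_cons (a b c x : Int) (xs : List Int) (st : Int × Int × Int × Int) :
    dfsS a b c (x :: xs) st =
      min (min (min (dfsS a b c xs (applyD 0 x st)) (dfsS a b c xs (applyD 1 x st)))
               (dfsS a b c xs (applyD 2 x st)))
          (dfsS a b c xs (applyD 3 x st)) := by
  obtain ⟨mp, a1, b1, c1⟩ := st
  simp [dfsS, dfsAlt, applyD]

lemma dfsS_le (a b c : Int) : ∀ (xs : List Int) (st : Int × Int × Int × Int),
    dfsS a b c xs st ≤ leafOf a b c st := by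
  intro xs
  induction xs with
  | nil => intro st; rw [dfsS_nil]
  | cons x xs ih =>
      intro st
      rw [dfsS_cons]
      calc min (min (min (dfsS a b c xs (applyD 0 x st)) (dfsS a b c xs (applyD 1 x st)))
               (dfsS a b c xs (applyD 2 x st))) (dfsS a b c xs (applyD 3 x st))
          ≤ dfsS a b c xs (applyD 0 x st) := by
            exact le_trans (min_le_left _ _) (le_trans (min_le_left _ _) (min_le_left _ _))
        _ ≤ leafOf a b c (applyD 0 x st) := ih _
        _ = leafOf a b c st := by simp [applyD]

lemma range4 : ∀ m : Nat, List.range (4 * m) = (List.range m).flatMap (fun q => [4 * q, 4 * q + 1, 4 * q + 2, 4 * q + 3]) := by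
  intro m
  induction m with
  | zero => rfl
  | succ m ih =>
      have step : List.range (4 * (m + 1)) = List.range (4 * m) ++ [4 * m, 4 * m + 1, 4 * m + 2, 4 * m + 3] := by
        have e : 4 * (m + 1) = (((4 * m + 1) + 1) + 1) + 1 := by ring
        rw [e, List.range_succ, List.range_succ, List.range_succ, List.range_succ]
        simp [List.append_assoc]
      rw [step, ih, List.range_succ, List.flatMap_append]
      simp

lemma foldl_flatMap' {α β γ : Type} (g : α → List β) (f : γ → β → γ) :
    ∀ (L : List α) (m : γ), (L.flatMap g).foldl f m = L.foldl (fun m x => (g x).foldl f m) m := by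
  intro L
  induction L with
  | nil => intro m; rfl
  | cons x L ih => intro m; simp only [List.flatMap_cons, List.foldl_append, List.foldl_cons, ih]

lemma foldl_min_swapF {α : Type} (f : Int → α → Int)
    (hf : ∀ (m v : Int) (s : α), f (min m v) s = min (f m s) v) :
    ∀ (S : List α) (m v : Int), S.foldl f (min m v) = min (S.foldl f m) v := by
  intro S
  induction S with
  | nil => intro m v; rfl
  | cons s S ih => intro m v; simp only [List.foldl_cons, hf m v s, ih]

lemma transpose (h : (Int × Int × Int × Int) → Int)
    (g0 g1 g2 g3 : (Int × Int × Int × Int) → Int × Int × Int × Int) :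
    ∀ (S : List (Int × Int × Int × Int)) (m : Int),
    (S.map g0 ++ S.map g1 ++ S.map g2 ++ S.map g3).foldl (fun m st => min m (h st)) m
      = S.foldl (fun m st => min (min (min (min m (h (g0 st))) (h (g1 st))) (h (g2 st))) (h (g3 st))) m := by
  have hsw : ∀ (S : List (Int × Int × Int × Int)) (m v : Int),
      S.foldl (fun m st => min m (h st)) (min m v) = min (S.foldl (fun m st => min m (h st)) m) v :=
    foldl_min_swapF _ (fun m v s => min_right_comm m v (h s))
  have hsw4 : ∀ (S : List (Int × Int × Int × Int)) (m v : Int),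
      S.foldl (fun m st => min (min (min (min m (h (g0 st))) (h (g1 st))) (h (g2 st))) (h (g3 st))) (min m v)
        = min (S.foldl (fun m st => min (min (min (min m (h (g0 st))) (h (g1 st))) (h (g2 st))) (h (g3 st))) m) v :=
    foldl_min_swapF _ (fun m v s => by
      simp only [min_assoc, min_comm v])
  intro S
  induction S with
  | nil => intro m; rfl
  | cons s S ih =>
      intro m
      simp only [List.map_cons, List.cons_append, List.foldl_cons, List.foldl_append] at ih ⊢
      simp only [hsw, hsw4, ih]

lemma coreL (a b c : Int) : ∀ (xs : List Int) (S : List (Int × Int × Int × Int)) (m0 : Int),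
    (PySem.List.pyRange 0 ((4 : Int) ^ xs.length) 1).foldl
      (fun m i => S.foldl (fun m' st => min m' (leafOf a b c (innerA i xs st))) m) m0
      = S.foldl (fun m' st => min m' (dfsS a b c xs st)) m0 := by
  intro xs
  induction xs with
  | nil =>
      intro S m0
      rw [show ((4 : Int) ^ ([] : List Int).length) = 1 by norm_num,
        show PySem.List.pyRange 0 1 1 = [0] by decide]
      simp only [List.foldl_cons, List.foldl_nil]
      have hfun : (fun (m' : Int) (st : Int × Int × Int × Int) => min m' (leafOf a b c (innerA 0 [] st)))
          = fun m' st => min m' (dfsS a b c [] st) := by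
        funext m' st; rw [dfsS_nil]; rfl
      rw [hfun]
  | cons x xs ih =>
      intro S m0
      have hN : ((4 : Int) ^ (x :: xs).length) = ((4 * 4 ^ xs.length : Nat) : Int) := by
        push_cast
        rw [List.length_cons, pow_succ]
        ring
      rw [hN, PySem.List.pyRange_one]
      rw [show (((4 * 4 ^ xs.length : Nat) : Int) - 0).toNat = 4 * 4 ^ xs.length by
        rw [sub_zero, Int.toNat_natCast]]
      rw [List.foldl_map, range4, foldl_flatMap']
      have hinner : ∀ (q : Nat) (r : Int), 0 ≤ r → r < 4 → ∀ (st : Int × Int × Int × Int),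
          innerA ((0 : Int) + ((4 * q : Nat) : Int) + r) (x :: xs) st
            = innerA ((q : Nat) : Int) xs (applyD r x st) := by
        intro q r hr0 hr4 st
        have e : (0 : Int) + ((4 * q : Nat) : Int) + r = 4 * ((q : Nat) : Int) + r := by
          push_cast; ring
        rw [e]
        show innerA (4 * ((q : Nat) : Int) + r) (x :: xs) st = _
        rw [innerA, (dec4 _ r hr0 hr4).1, (dec4 _ r hr0 hr4).2]
      -- rewrite the per-q body: fold over the four literal codes = fold over mapped state lists
      have hbody : ∀ (q : Nat) (m : Int),
          (([4 * q, 4 * q + 1, 4 * q + 2, 4 * q + 3] : List Nat).foldl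
            (fun (m : Int) (k : Nat) => S.foldl (fun m' st => min m' (leafOf a b c (innerA (0 + (k : Int)) (x :: xs) st))) m) m)
          = (S.map (applyD 0 x) ++ S.map (applyD 1 x) ++ S.map (applyD 2 x) ++ S.map (applyD 3 x)).foldl
              (fun m' st => min m' (leafOf a b c (innerA ((q : Nat) : Int) xs st))) m := by
        intro q m
        simp only [List.foldl_cons, List.foldl_nil, List.foldl_append, List.foldl_map]
        rw [show ((4 * q + 1 : Nat) : Int) = ((4 * q : Nat) : Int) + 1 by push_cast; ring]
        rw [show ((4 * q + 2 : Nat) : Int) = ((4 * q : Nat) : Int) + 2 by push_cast; ring]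
        rw [show ((4 * q + 3 : Nat) : Int) = ((4 * q : Nat) : Int) + 3 by push_cast; ring]
        rw [show (0 : Int) + ((4 * q : Nat) : Int) = 0 + ((4 * q : Nat) : Int) + 0 by ring]
        rw [show (0 : Int) + (((4 * q : Nat) : Int) + 1) = 0 + ((4 * q : Nat) : Int) + 1 by ring]
        rw [show (0 : Int) + (((4 * q : Nat) : Int) + 2) = 0 + ((4 * q : Nat) : Int) + 2 by ring]
        rw [show (0 : Int) + (((4 * q : Nat) : Int) + 3) = 0 + ((4 * q : Nat) : Int) + 3 by ring]
        simp only [hinner q 0 (by omega) (by omega), hinner q 1 (by omega) (by omega),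
          hinner q 2 (by omega) (by omega), hinner q 3 (by omega) (by omega)]
      have hS4 := ih (S.map (applyD 0 x) ++ S.map (applyD 1 x) ++ S.map (applyD 2 x) ++ S.map (applyD 3 x)) m0
      rw [PySem.List.pyRange_one,
        show (((4 : Int) ^ xs.length) - 0).toNat = 4 ^ xs.length by
          rw [sub_zero, show ((4 : Int) ^ xs.length) = ((4 ^ xs.length : Nat) : Int) by push_cast; ring,
            Int.toNat_natCast],
        List.foldl_map] at hS4
      simp only [zero_add] at hS4
      have hfun : (fun (m : Int) (q : Nat) =>
          (([4 * q, 4 * q + 1, 4 * q + 2, 4 * q + 3] : List Nat).foldl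
            (fun (m : Int) (k : Nat) => S.foldl (fun m' st => min m' (leafOf a b c (innerA (0 + (k : Int)) (x :: xs) st))) m) m))
          = fun (m : Int) (q : Nat) =>
            (S.map (applyD 0 x) ++ S.map (applyD 1 x) ++ S.map (applyD 2 x) ++ S.map (applyD 3 x)).foldl
              (fun m' st => min m' (leafOf a b c (innerA ((q : Nat) : Int) xs st))) m :=
        funext fun m => funext fun q => hbody q m
      simp only [zero_add] at hfun ⊢
      rw [hfun, hS4]
      rw [transpose (dfsS a b c xs) (applyD 0 x) (applyD 1 x) (applyD 2 x) (applyD 3 x)]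
      have hfin : (fun (m' : Int) (st : Int × Int × Int × Int) =>
            min (min (min (min m' (dfsS a b c xs (applyD 0 x st))) (dfsS a b c xs (applyD 1 x st)))
              (dfsS a b c xs (applyD 2 x st))) (dfsS a b c xs (applyD 3 x st)))
          = fun m' st => min m' (dfsS a b c (x :: xs) st) := by
        funext m' st
        rw [dfsS_cons]
        simp [min_assoc]
      rw [hfin]

lemma combine_min (a b c m : Int) (st : Int × Int × Int × Int) (hm : m ≤ 10 ^ 9) :
    (if st.2.1 > 0 ∧ st.2.2.1 > 0 ∧ st.2.2.2 > 0 then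
      min (st.1 + |a - st.2.1| + |b - st.2.2.1| + |c - st.2.2.2|) m else m)
      = min m (leafOf a b c st) := by
  unfold leafOf
  split_ifs with hv
  · exact min_comm _ _
  · exact (min_eq_left hm).symm

lemma foldl_combine_eq (a b c : Int) (g : Int → Int × Int × Int × Int) :
    ∀ (L : List Int) (m : Int), m ≤ 10 ^ 9 →
    L.foldl (fun m i => if (g i).2.1 > 0 ∧ (g i).2.2.1 > 0 ∧ (g i).2.2.2 > 0 then
        min ((g i).1 + |a - (g i).2.1| + |b - (g i).2.2.1| + |c - (g i).2.2.2|) m else m) m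
      = L.foldl (fun m i => min m (leafOf a b c (g i))) m := by
  intro L
  induction L with
  | nil => intro m hm; rfl
  | cons i L ih =>
      intro m hm
      simp only [List.foldl_cons]
      rw [combine_min a b c m (g i) hm]
      exact ih _ (le_trans (min_le_left _ _) hm)

lemma dfsB_eq (n a b c : Int) (l : List Int) (hn : n ≤ (l.length : Int)) :
    ∀ (k jn : Nat), (jn : Int) + (k : Int) = n → ∀ (a1 b1 c1 mp : Int),
    dfsB n a b c l k (jn : Int) a1 b1 c1 mp = dfsAlt a b c ((l.drop jn).take k) a1 b1 c1 mp := by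
  intro k
  induction k with
  | zero =>
      intro jn hjn a1 b1 c1 mp
      rw [dfsB, if_pos (by omega : (jn : Int) = n)]
      rfl
  | succ k ih =>
      intro jn hjn a1 b1 c1 mp
      have hlt : jn < l.length := by omega
      rw [dfsB, if_neg (by omega : ¬ (jn : Int) = n)]
      have hget : PySem.List.pyGetD l (jn : Int) 0 = l[jn] := by
        simp [PySem.List.pyGetD_natCast, List.getD_eq_getElem?_getD, List.getElem?_eq_getElem hlt]
      have hdrop : (l.drop jn).take (k + 1) = l[jn] :: ((l.drop (jn + 1)).take k) := by
        rw [List.drop_eq_getElem_cons hlt, List.take_succ_cons]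
      have e1 : (jn : Int) + 1 = ((jn + 1 : Nat) : Int) := by push_cast; ring
      rw [hget, hdrop, e1, dfsAlt]
      rw [ih (jn + 1) (by push_cast; omega) a1 b1 c1 mp,
        ih (jn + 1) (by push_cast; omega) (a1 + l[jn]) b1 c1 (mp + 10),
        ih (jn + 1) (by push_cast; omega) a1 (b1 + l[jn]) c1 (mp + 10),
        ih (jn + 1) (by push_cast; omega) a1 b1 (c1 + l[jn]) (mp + 10)]

theorem getMinMP_spec : Claim_equal_getMinMP := by
  intro n a b c l _ hpre
  obtain ⟨hn0, hnl⟩ := hpre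
  unfold Spec_getMinMP getMinMP getMinMP_alt
  have hnt : ((n.toNat : Nat) : Int) = n := Int.toNat_of_nonneg hn0
  have hlen : (0 : Nat) + n.toNat ≤ l.length := by omega
  have hout : ∀ (m i : Int), outerA n a b c l m i =
      if (innerA i (l.take n.toNat) (0, 0, 0, 0)).2.1 > 0 ∧
         (innerA i (l.take n.toNat) (0, 0, 0, 0)).2.2.1 > 0 ∧
         (innerA i (l.take n.toNat) (0, 0, 0, 0)).2.2.2 > 0 then
        min ((innerA i (l.take n.toNat) (0, 0, 0, 0)).1
          + |a - (innerA i (l.take n.toNat) (0, 0, 0, 0)).2.1|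
          + |b - (innerA i (l.take n.toNat) (0, 0, 0, 0)).2.2.1|
          + |c - (innerA i (l.take n.toNat) (0, 0, 0, 0)).2.2.2|) m
      else m := by
    intro m i
    obtain ⟨t, ht⟩ := foldl_stepA l n.toNat 0 hlen i (0, 0, 0, 0)
    simp only [Nat.cast_zero, zero_add, hnt, List.drop_zero] at ht
    unfold outerA
    rcases hu : innerA i (l.take n.toNat) (0, 0, 0, 0) with ⟨mp, a1, b1, c1⟩
    rw [hu] at ht
    rw [ht]
  have hfn : outerA n a b c l = fun (m i : Int) =>
      if (innerA i (l.take n.toNat) (0, 0, 0, 0)).2.1 > 0 ∧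
         (innerA i (l.take n.toNat) (0, 0, 0, 0)).2.2.1 > 0 ∧
         (innerA i (l.take n.toNat) (0, 0, 0, 0)).2.2.2 > 0 then
        min ((innerA i (l.take n.toNat) (0, 0, 0, 0)).1
          + |a - (innerA i (l.take n.toNat) (0, 0, 0, 0)).2.1|
          + |b - (innerA i (l.take n.toNat) (0, 0, 0, 0)).2.2.1|
          + |c - (innerA i (l.take n.toNat) (0, 0, 0, 0)).2.2.2|) m
      else m := funext fun m => funext fun i => hout m i
  rw [hfn]
  rw [foldl_combine_eq a b c (fun i => innerA i (l.take n.toNat) (0, 0, 0, 0))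
    (PySem.List.pyRange 0 ((4 : Int) ^ n.toNat) 1) (10 ^ 9) (le_refl _)]
  have hc := coreL a b c (l.take n.toNat) [(0, 0, 0, 0)] (10 ^ 9)
  simp only [List.foldl_cons, List.foldl_nil] at hc
  rw [List.length_take, min_eq_left (by omega : n.toNat ≤ l.length)] at hc
  rw [hc]
  rw [min_eq_right (by
    have := dfsS_le a b c (l.take n.toNat) (0, 0, 0, 0)
    simpa [leafOf] using this)]
  have hb := dfsB_eq n a b c l hnl n.toNat 0 (by push_cast; omega) 0 0 0 0
  simp only [Nat.cast_zero, List.drop_zero] at hb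
  rw [hb]
  rfl
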